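-- pv_equiv track=rewrite | github.com/john-d-murphy/remdata | rem_agenda.py | slot_list
-- ===== SOURCE A (Python) =====
-- def slot_list(agenda_start_hour, agenda_end_hour):
--     """
--     Create an array for slots of events in 15 minute increments
--
--     Parameters
--     ----------
--     agenda_start_hour : int
--         Hour the agenda starts
--     agenda_end_hour : int
--         Hour the agenda ends
--
--     Returns
--     -------
--     array
--         Array of possible agenda times for the day
--     """
--     intervals = []
--     for interval in range(agenda_start_hour * 60, agenda_end_hour * 60, 15):
--         if interval % 60 == 0:
--             intervals.append(".")
--         else:
--             intervals.append(" ")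
--     intervals.append(".")
--     return intervals
-- ===== SOURCE B (Python) =====
-- def slot_list(agenda_start_hour, agenda_end_hour):
--     """Closed form: four slots per hour in the fixed pattern '. ', then a trailing '.'."""
--     return [".", " ", " ", " "] * (agenda_end_hour - agenda_start_hour) + ["."]
-- ===== Notes on version B (the rewrite author's own statement) =====
-- stated objective: simpler
-- what changed: Replaced the 15-minute loop with its per-element %60 test by the closed-form list ['.',' ',' ',' ']*(end-start)+['.'], since every hour contributes exactly that fixed 4-slot pattern.
import Mathlib
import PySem

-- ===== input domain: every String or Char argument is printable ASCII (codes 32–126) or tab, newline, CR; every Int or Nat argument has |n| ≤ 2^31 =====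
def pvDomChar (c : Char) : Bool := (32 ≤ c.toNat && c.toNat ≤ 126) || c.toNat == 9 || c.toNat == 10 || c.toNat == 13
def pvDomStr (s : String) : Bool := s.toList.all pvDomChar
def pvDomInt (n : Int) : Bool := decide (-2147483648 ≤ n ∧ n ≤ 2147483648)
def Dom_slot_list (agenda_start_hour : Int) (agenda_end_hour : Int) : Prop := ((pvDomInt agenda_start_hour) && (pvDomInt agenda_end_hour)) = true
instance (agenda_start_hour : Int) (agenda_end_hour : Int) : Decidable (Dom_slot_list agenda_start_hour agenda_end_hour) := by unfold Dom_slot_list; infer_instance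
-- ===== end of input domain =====

-- B replaces A's 15-minute loop and per-element %60 test by the closed-form
-- list pattern ['.',' ',' ',' '] repeated (end-start) times plus a trailing '.',
-- for simplicity; same result on all inputs.


-- ===== PORT A =====
def slot_list (agenda_start_hour : Int) (agenda_end_hour : Int) : List String :=
  (PySem.List.pyRange (agenda_start_hour * 60) (agenda_end_hour * 60) 15).foldl
    (fun intervals interval =>
      if PySem.Int.mod interval 60 = 0 then intervals ++ ["."]
      else intervals ++ [" "]) ([] : List String)
  ++ ["."]

-- ===== PORT B =====
def slot_list_alt (agenda_start_hour : Int) (agenda_end_hour : Int) : List String :=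
  (List.replicate (agenda_end_hour - agenda_start_hour).toNat
    ([".", " ", " ", " "] : List String)).flatten ++ ["."]

-- ===== PRECONDITION & SPEC =====
def Spec_slot_list (agenda_start_hour : Int) (agenda_end_hour : Int) (out : List String) : Prop := out = slot_list_alt agenda_start_hour agenda_end_hour
instance (agenda_start_hour : Int) (agenda_end_hour : Int) (out : List String) : Decidable (Spec_slot_list agenda_start_hour agenda_end_hour out) := by unfold Spec_slot_list; infer_instance

-- ===== CLAIM (what is proved, stated in full; the proofs are below) =====
def Claim_equal_slot_list : Prop := ∀ (agenda_start_hour : Int) (agenda_end_hour : Int), Dom_slot_list agenda_start_hour agenda_end_hour → Spec_slot_list agenda_start_hour agenda_end_hour (slot_list agenda_start_hour agenda_end_hour)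

-- ===== LEMMAS AND PROOFS =====

-- The loop body, written with the branch inside the appended singleton.
lemma slot_step (intervals : List String) (interval : Int) :
    (if PySem.Int.mod interval 60 = 0 then intervals ++ ["."] else intervals ++ [" "])
      = intervals ++ [if PySem.Int.mod interval 60 = 0 then "." else " "] := by
  split <;> rfl

-- The first 4*k loop emissions (starting at a multiple of 60, step 15) are k copies
-- of the pattern ['.',' ',' ',' '].
lemma slot_pattern (a : Int) (ha : 60 ∣ a) (k : Nat) :
    (List.range (4 * k)).map
        (fun (i : Nat) => if PySem.Int.mod (a + 15 * (i : Int)) 60 = 0 then "." else " ")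
      = (List.replicate k ([".", " ", " ", " "] : List String)).flatten := by
  induction k with
  | zero => rfl
  | succ k ih =>
    have h4 : 4 * (k + 1) = (4 * k + 1 + 1 + 1) + 1 := by omega
    have e0 : PySem.Int.mod (a + 15 * ((4 * k : Nat) : Int)) 60 = 0 := by
      rw [PySem.Int.mod_eq_zero_iff_dvd]; push_cast; omega
    have e1 : PySem.Int.mod (a + 15 * ((4 * k + 1 : Nat) : Int)) 60 ≠ 0 := by
      rw [Ne, PySem.Int.mod_eq_zero_iff_dvd]; push_cast; omega
    have e2 : PySem.Int.mod (a + 15 * ((4 * k + 1 + 1 : Nat) : Int)) 60 ≠ 0 := by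
      rw [Ne, PySem.Int.mod_eq_zero_iff_dvd]; push_cast; omega
    have e3 : PySem.Int.mod (a + 15 * ((4 * k + 1 + 1 + 1 : Nat) : Int)) 60 ≠ 0 := by
      rw [Ne, PySem.Int.mod_eq_zero_iff_dvd]; push_cast; omega
    rw [h4, List.range_succ, List.range_succ, List.range_succ, List.range_succ,
      List.replicate_succ', List.flatten_append]
    simp only [List.map_append, List.map_cons, List.map_nil]
    rw [ih, if_pos e0, if_neg e1, if_neg e2, if_neg e3]
    simp

-- flatMap of singletons is a map
lemma flatMap_singleton_map {α β : Type} (f : α → β) (l : List α) :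
    List.flatMap (fun x => [f x]) l = l.map f := by
  induction l with
  | nil => rfl
  | cons x xs ih => simp [List.flatMap_cons, ih]

-- The loop's iteration count is 4 slots per hour.
lemma slot_count (s e : Int) :
    (if s * 60 < e * 60 then ((e * 60 - s * 60 + 15 - 1) / 15).toNat else 0)
      = 4 * (e - s).toNat := by
  split <;> omega

-- ===== VERDICT (by name: the statement is the Claim_ definition above) =====
theorem slot_list_spec : Claim_equal_slot_list := by
  intro s e _
  unfold Spec_slot_list slot_list slot_list_alt
  have hbody : (fun (intervals : List String) (interval : Int) =>
      if PySem.Int.mod interval 60 = 0 then intervals ++ ["."] else intervals ++ [" "])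
    = fun intervals interval =>
        intervals ++ [if PySem.Int.mod interval 60 = 0 then "." else " "] :=
    funext fun acc => funext fun x => slot_step acc x
  rw [hbody, PySem.List.foldl_append_eq_flatMap,
    PySem.List.pyRange_of_pos _ _ (by norm_num : (0:Int) < 15), slot_count,
    flatMap_singleton_map, List.map_map]
  rw [List.nil_append,
    show ((fun interval => if PySem.Int.mod interval 60 = 0 then "." else " ") ∘
        fun k : Nat => s * 60 + 15 * (k : Int))
      = fun (i : Nat) =>
          if PySem.Int.mod (s * 60 + 15 * (i : Int)) 60 = 0 then "." else " " from rfl,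
    slot_pattern (s * 60) ⟨s, by ring⟩ (e - s).toNat]
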